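-- pv_equiv track=rewrite | github.com/Duilius/DataExtractor | ini_dataextractor.py | determinar_mensaje
-- ===== SOURCE A (Python) =====
-- from typing import List, Dict, Optional
--
-- def determinar_mensaje(codigos: List[str], resultados: Dict[str, str]) -> str:
--     if not codigos:
--         return "POSIBLE NUEVO"
--     if any(codigo.startswith("AF") and resultados.get(codigo) == "faltante" for codigo in codigos):
--         return "POSIBLE SOBRANTE"
--     if any(
--         (codigo.startswith("2023") or codigo.startswith("2022"))
--         and not any(c.startswith("AF") for c in codigos)
--         and resultados.get(codigo) == "faltante"
--         for codigo in codigos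
--     ):
--         return "POSIBLE SOBRANTE"
--     if any(
--         (codigo.startswith("2023") or codigo.startswith("2022"))
--         and not any(c.startswith("AF") for c in codigos)
--         and resultados.get(codigo) == "existe"
--         for codigo in codigos
--     ):
--         return "SIN COD PATR"
--     return "N/A"
-- ===== SOURCE B (Python) =====
-- from typing import List, Dict
--
-- def determinar_mensaje(codigos: List[str], resultados: Dict[str, str]) -> str:
--     if not codigos:
--         return "POSIBLE NUEVO"
--     has_af = af_falt = y_falt = y_exi = False
--     for c in codigos:
--         r = resultados.get(c)
--         if c.startswith("AF"):
--             has_af = True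
--             if r == "faltante":
--                 af_falt = True
--         elif c.startswith("2023") or c.startswith("2022"):
--             if r == "faltante":
--                 y_falt = True
--             elif r == "existe":
--                 y_exi = True
--     if has_af:
--         return "POSIBLE SOBRANTE" if af_falt else "N/A"
--     if y_falt:
--         return "POSIBLE SOBRANTE"
--     if y_exi:
--         return "SIN COD PATR"
--     return "N/A"
-- ===== Notes on version B (the rewrite author's own statement) =====
-- stated objective: simpler
-- what changed: Replaces four separate any() scans (each re-scanning for AF codes in a nested any) with a single pass that collects four boolean flags, followed by a small decision tree.
import Mathlib
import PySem

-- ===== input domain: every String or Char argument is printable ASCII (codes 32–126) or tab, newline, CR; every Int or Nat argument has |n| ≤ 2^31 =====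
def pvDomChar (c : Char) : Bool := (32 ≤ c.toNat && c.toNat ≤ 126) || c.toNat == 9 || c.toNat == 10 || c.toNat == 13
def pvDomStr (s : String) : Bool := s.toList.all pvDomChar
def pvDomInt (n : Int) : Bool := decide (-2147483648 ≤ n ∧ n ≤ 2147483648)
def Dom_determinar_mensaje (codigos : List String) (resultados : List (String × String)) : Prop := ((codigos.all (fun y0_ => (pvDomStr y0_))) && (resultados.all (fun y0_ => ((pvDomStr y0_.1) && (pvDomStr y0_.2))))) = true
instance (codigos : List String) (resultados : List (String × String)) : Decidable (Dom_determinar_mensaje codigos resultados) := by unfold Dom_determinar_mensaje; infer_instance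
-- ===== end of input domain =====

-- B replaces A's four flat any() scans (with a nested AF re-scan) by one pass collecting four flags plus a decision tree; objective: simpler.


-- ===== PORT A =====
def determinar_mensaje (codigos : List String) (resultados : List (String × String)) : String :=
  if codigos.isEmpty then "POSIBLE NUEVO"
  else if codigos.any (fun c => PySem.Str.startswith c "AF" &&
            ((PySem.Dict.mk resultados).get? c == some "faltante")) then "POSIBLE SOBRANTE"
  else if codigos.any (fun c =>
            (PySem.Str.startswith c "2023" || PySem.Str.startswith c "2022") &&
            (!(codigos.any (fun c2 => PySem.Str.startswith c2 "AF")) &&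
            ((PySem.Dict.mk resultados).get? c == some "faltante"))) then "POSIBLE SOBRANTE"
  else if codigos.any (fun c =>
            (PySem.Str.startswith c "2023" || PySem.Str.startswith c "2022") &&
            (!(codigos.any (fun c2 => PySem.Str.startswith c2 "AF")) &&
            ((PySem.Dict.mk resultados).get? c == some "existe"))) then "SIN COD PATR"
  else "N/A"

-- ===== PORT B =====
-- the single-pass flag collector of Source B: (has_af, af_falt, y_falt, y_exi)
def dmFlags (resultados : List (String × String)) (codigos : List String) :
    Bool × Bool × Bool × Bool :=
  codigos.foldl (fun s c =>
    if PySem.Str.startswith c "AF" then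
      (true, s.2.1 || ((PySem.Dict.mk resultados).get? c == some "faltante"), s.2.2.1, s.2.2.2)
    else if PySem.Str.startswith c "2023" || PySem.Str.startswith c "2022" then
      if (PySem.Dict.mk resultados).get? c == some "faltante" then (s.1, s.2.1, true, s.2.2.2)
      else if (PySem.Dict.mk resultados).get? c == some "existe" then (s.1, s.2.1, s.2.2.1, true)
      else s
    else s) (false, false, false, false)

def determinar_mensaje_alt (codigos : List String) (resultados : List (String × String)) : String :=
  if codigos.isEmpty then "POSIBLE NUEVO"
  else
    let f := dmFlags resultados codigos
    if f.1 then (if f.2.1 then "POSIBLE SOBRANTE" else "N/A")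
    else if f.2.2.1 then "POSIBLE SOBRANTE"
    else if f.2.2.2 then "SIN COD PATR"
    else "N/A"

-- ===== PRECONDITION & SPEC =====
def Spec_determinar_mensaje (codigos : List String) (resultados : List (String × String)) (out : String) : Prop := out = determinar_mensaje_alt codigos resultados
instance (codigos : List String) (resultados : List (String × String)) (out : String) : Decidable (Spec_determinar_mensaje codigos resultados out) := by unfold Spec_determinar_mensaje; infer_instance

-- ===== CLAIM (what is proved, stated in full; the proofs are below) =====
def Claim_equal_determinar_mensaje : Prop := ∀ (codigos : List String) (resultados : List (String × String)), Dom_determinar_mensaje codigos resultados → Spec_determinar_mensaje codigos resultados (determinar_mensaje codigos resultados)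

-- ===== LEMMAS AND PROOFS =====

theorem any_congr_mem {α : Type} (xs : List α) (f g : α → Bool)
    (h : ∀ x ∈ xs, f x = g x) : xs.any f = xs.any g := by
  induction xs with
  | nil => rfl
  | cons x xs ih =>
    simp only [List.any_cons, h x (by simp), ih (fun y hy => h y (by simp [hy]))]

-- the fold computes the or of the four per-element predicates (has_af, af_falt, y_falt, y_exi)
theorem dmFlags_eq (resultados : List (String × String)) (codigos : List String) :
    dmFlags resultados codigos =
      (codigos.any (fun c => PySem.Str.startswith c "AF"),
       codigos.any (fun c => PySem.Str.startswith c "AF" &&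
          ((PySem.Dict.mk resultados).get? c == some "faltante")),
       codigos.any (fun c => !(PySem.Str.startswith c "AF") &&
          ((PySem.Str.startswith c "2023" || PySem.Str.startswith c "2022") &&
          ((PySem.Dict.mk resultados).get? c == some "faltante"))),
       codigos.any (fun c => !(PySem.Str.startswith c "AF") &&
          ((PySem.Str.startswith c "2023" || PySem.Str.startswith c "2022") &&
          (!((PySem.Dict.mk resultados).get? c == some "faltante") &&
          ((PySem.Dict.mk resultados).get? c == some "existe"))))) := by
  unfold dmFlags
  suffices h : ∀ (s : Bool × Bool × Bool × Bool), codigos.foldl (fun s c =>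
      if PySem.Str.startswith c "AF" then
        (true, s.2.1 || ((PySem.Dict.mk resultados).get? c == some "faltante"), s.2.2.1, s.2.2.2)
      else if PySem.Str.startswith c "2023" || PySem.Str.startswith c "2022" then
        if (PySem.Dict.mk resultados).get? c == some "faltante" then (s.1, s.2.1, true, s.2.2.2)
        else if (PySem.Dict.mk resultados).get? c == some "existe" then (s.1, s.2.1, s.2.2.1, true)
        else s
      else s) s =
      (s.1 || codigos.any (fun c => PySem.Str.startswith c "AF"),
       s.2.1 || codigos.any (fun c => PySem.Str.startswith c "AF" &&
          ((PySem.Dict.mk resultados).get? c == some "faltante")),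
       s.2.2.1 || codigos.any (fun c => !(PySem.Str.startswith c "AF") &&
          ((PySem.Str.startswith c "2023" || PySem.Str.startswith c "2022") &&
          ((PySem.Dict.mk resultados).get? c == some "faltante"))),
       s.2.2.2 || codigos.any (fun c => !(PySem.Str.startswith c "AF") &&
          ((PySem.Str.startswith c "2023" || PySem.Str.startswith c "2022") &&
          (!((PySem.Dict.mk resultados).get? c == some "faltante") &&
          ((PySem.Dict.mk resultados).get? c == some "existe"))))) by
    have h0 := h (false, false, false, false)
    simpa only [Bool.false_or] using h0
  induction codigos with
  | nil => intro s; simp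
  | cons c cs ih =>
    intro s
    simp only [List.foldl_cons, List.any_cons, ih]
    cases hAF : PySem.Str.startswith c "AF" <;>
      cases hY : (PySem.Str.startswith c "2023" || PySem.Str.startswith c "2022") <;>
      cases hF : ((PySem.Dict.mk resultados).get? c == some "faltante") <;>
      cases hE : ((PySem.Dict.mk resultados).get? c == some "existe") <;>
      simp [hAF, hY, hF, hE]

-- ===== VERDICT (by name: the statement is the Claim_ definition above) =====
theorem determinar_mensaje_spec : Claim_equal_determinar_mensaje := by
  intro codigos resultados _
  unfold Spec_determinar_mensaje determinar_mensaje determinar_mensaje_alt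
  rw [dmFlags_eq]
  by_cases hE : codigos.isEmpty = true
  · simp only [hE, reduceIte]
  · have hE' : codigos.isEmpty = false := by
      revert hE; cases codigos.isEmpty <;> simp
    by_cases hAF : (codigos.any fun c => PySem.Str.startswith c "AF") = true
    · -- some AF code exists: A's branches 2/3 are dead; B takes the has_af arm
      have hb2 : ∀ (v : String), (codigos.any fun c =>
          (PySem.Str.startswith c "2023" || PySem.Str.startswith c "2022") &&
          (!(codigos.any fun c2 => PySem.Str.startswith c2 "AF") &&
          ((PySem.Dict.mk resultados).get? c == some v))) = false := by
        intro v
        rw [List.any_eq_false]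
        intro c _
        simp only [hAF, Bool.not_true, Bool.false_and, Bool.and_false]
        exact Bool.false_ne_true
      rw [hb2 "faltante", hb2 "existe"]
      simp only [hE', hAF, Bool.false_eq_true, reduceIte]
    · -- no AF code: A's nested !any is true, flags f3/f4 match A's branches 2/3
      have hAF' : (codigos.any fun c => PySem.Str.startswith c "AF") = false := by
        revert hAF; cases codigos.any fun c => PySem.Str.startswith c "AF" <;> simp
      have hno : ∀ c ∈ codigos, PySem.Str.startswith c "AF" = false := by
        intro c hc
        have := (List.any_eq_false.mp hAF') c hc
        revert this; cases PySem.Str.startswith c "AF" <;> simp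
      have hb1 : (codigos.any fun c => PySem.Str.startswith c "AF" &&
          ((PySem.Dict.mk resultados).get? c == some "faltante")) = false := by
        rw [List.any_eq_false]
        intro c hc
        simp only [hno c hc, Bool.false_and]
        exact Bool.false_ne_true
      have h2 : (codigos.any fun c =>
          (PySem.Str.startswith c "2023" || PySem.Str.startswith c "2022") &&
          (!(codigos.any fun c2 => PySem.Str.startswith c2 "AF") &&
          ((PySem.Dict.mk resultados).get? c == some "faltante"))) =
          (codigos.any fun c => !(PySem.Str.startswith c "AF") &&
          ((PySem.Str.startswith c "2023" || PySem.Str.startswith c "2022") &&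
          ((PySem.Dict.mk resultados).get? c == some "faltante"))) := by
        refine any_congr_mem _ _ _ (fun c hc => ?_)
        simp only [hAF', hno c hc, Bool.not_false, Bool.true_and]
      have h3 : (codigos.any fun c =>
          (PySem.Str.startswith c "2023" || PySem.Str.startswith c "2022") &&
          (!(codigos.any fun c2 => PySem.Str.startswith c2 "AF") &&
          ((PySem.Dict.mk resultados).get? c == some "existe"))) =
          (codigos.any fun c => !(PySem.Str.startswith c "AF") &&
          ((PySem.Str.startswith c "2023" || PySem.Str.startswith c "2022") &&
          (!((PySem.Dict.mk resultados).get? c == some "faltante") &&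
          ((PySem.Dict.mk resultados).get? c == some "existe")))) := by
        refine any_congr_mem _ _ _ (fun c hc => ?_)
        by_cases hf : ((PySem.Dict.mk resultados).get? c == some "faltante") = true
        · have hg : (PySem.Dict.mk resultados).get? c = some "faltante" := by
            exact beq_iff_eq.mp hf
          have he : ((PySem.Dict.mk resultados).get? c == some "existe") = false := by
            rw [hg]; decide
          simp only [hAF', hno c hc, hf, he, Bool.not_false,
            Bool.not_true, Bool.and_false]
        · have hf' : ((PySem.Dict.mk resultados).get? c == some "faltante") = false := by
            revert hf; cases ((PySem.Dict.mk resultados).get? c == some "faltante") <;> simp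
          simp only [hAF', hno c hc, hf', Bool.not_false, Bool.true_and]
      rw [h2, h3]
      simp only [hE', hAF', hb1, Bool.false_eq_true, reduceIte]
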